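-- pv_equiv track=rewrite | github.com/xkazm04/actor | src/templates/due_diligence.py | _group_findings
-- ===== SOURCE A (Python) =====
-- from typing import List, Dict, Any, Optional
--
-- def _group_findings(findings: List[Dict[str, Any]]) -> Dict[str, List[Dict[str, Any]]]:
--     """Group findings with due diligence priority order."""
--     order = ["red_flag", "legal_history", "financial_health", "reputation_signal", "key_person", "company_profile"]
--     grouped: Dict[str, List[Dict[str, Any]]] = {}
--
--     for ftype in order:
--         type_findings = [f for f in findings if f.get("finding_type") == ftype]
--         if type_findings:
--             grouped[ftype] = type_findings
--
--     for f in findings: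
--         ftype = f.get("finding_type", "other")
--         if ftype not in grouped:
--             grouped[ftype] = []
--         if f not in grouped.get(ftype, []):
--             grouped.setdefault(ftype, []).append(f)
--
--     return grouped
-- ===== SOURCE B (Python) =====
-- def _group_findings(findings):
--     """Group findings with due diligence priority order (single bucketing pass)."""
--     order = ["red_flag", "legal_history", "financial_health", "reputation_signal", "key_person", "company_profile"]
--     groups = {}
--     for f in findings:
--         groups.setdefault(f.get("finding_type", "other"), []).append(f)
--     result = {}
--     for t in order:
--         if t in groups:
--             result[t] = groups[t]
--     oset = set(order)
--     for t, fs in groups.items():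
--         if t in oset:
--             continue
--         deduped = []
--         for f in fs:
--             if f not in deduped:
--                 deduped.append(f)
--         result[t] = deduped
--     return result
-- ===== Notes on version B (the rewrite author's own statement) =====
-- stated objective: alternative
-- what changed: A scans the findings list once per priority type and then re-scans each growing bucket with a linear membership test for every finding; B buckets all findings in one setdefault/append pass over a grouping dict, copies priority buckets verbatim from it, and value-dedups only the remaining non-priority buckets.
import Mathlib
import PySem

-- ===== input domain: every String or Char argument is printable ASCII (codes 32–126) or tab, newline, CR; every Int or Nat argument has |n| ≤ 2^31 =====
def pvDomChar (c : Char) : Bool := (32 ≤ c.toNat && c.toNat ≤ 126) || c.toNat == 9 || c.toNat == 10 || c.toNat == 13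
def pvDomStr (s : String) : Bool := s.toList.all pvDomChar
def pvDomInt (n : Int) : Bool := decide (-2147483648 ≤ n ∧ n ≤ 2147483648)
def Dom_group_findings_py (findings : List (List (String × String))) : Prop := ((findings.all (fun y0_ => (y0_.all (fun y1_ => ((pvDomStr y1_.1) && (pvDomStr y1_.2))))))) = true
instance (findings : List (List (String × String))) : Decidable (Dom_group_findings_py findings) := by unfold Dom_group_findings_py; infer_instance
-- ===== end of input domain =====

-- B replaces A's six per-priority scans plus a quadratic membership loop by one bucketing pass
-- over a grouping dict followed by assembling the result from the buckets (objective: alternative).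

-- ===== PORT A =====
-- Shared Python primitives: a finding is the dict built from its pair list.
def pvOrder : List String :=
  ["red_flag", "legal_history", "financial_health", "reputation_signal", "key_person", "company_profile"]

-- f.get("finding_type")
def pvGetFT (f : List (String × String)) : Option String :=
  (PySem.Dict.ofList f).get? "finding_type"

-- f.get("finding_type", "other")
def pvFT (f : List (String × String)) : String := (pvGetFT f).getD "other"

-- canonical (key-sorted) form of the dict a pair list denotes
def pvNorm (f : List (String × String)) : List (String × String) :=
  PySem.List.sorted (PySem.Dict.ofList f).items (fun p => p.1) false

-- Python's `==` on two findings-as-dicts (key order irrelevant): equality of canonical forms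
def pvDictEq (f g : List (String × String)) : Bool := pvNorm f == pvNorm g

def group_findings_py (findings : List (List (String × String))) : List (String × List (List (String × String))) :=
  -- grouped = {}; for ftype in order: …
  let grouped : PySem.Dict String (List (List (String × String))) :=
    pvOrder.foldl (fun g ftype =>
      let type_findings := findings.filter (fun f => pvGetFT f == some ftype)
      if type_findings.isEmpty then g else g.insert ftype type_findings)
      PySem.Dict.empty
  -- for f in findings: …
  let grouped := findings.foldl (fun g f =>
      let ftype := pvFT f
      let g := if g.contains ftype then g else g.insert ftype []
      if (g.getD ftype []).any (fun x => pvDictEq f x) then g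
      else g.insert ftype (g.getD ftype [] ++ [f])) grouped
  grouped.items

-- ===== PORT B =====
def group_findings_py_alt (findings : List (List (String × String))) : List (String × List (List (String × String))) :=
  -- groups = {}; for f in findings: groups.setdefault(f.get("finding_type","other"), []).append(f)
  let groups : PySem.Dict String (List (List (String × String))) :=
    findings.foldl (fun g f => g.modify (pvFT f) [] (· ++ [f])) PySem.Dict.empty
  -- result = {}; for t in order: if t in groups: result[t] = groups[t]
  let result : PySem.Dict String (List (List (String × String))) :=
    pvOrder.foldl (fun r t =>
      match groups.get? t with
      | some fs => r.insert t fs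
      | none => r) PySem.Dict.empty
  -- oset = set(order); for t, fs in groups.items(): if t in oset: continue; dedup fs; result[t] = deduped
  let oset := PySem.Set.ofList pvOrder
  let result := groups.items.foldl (fun r p =>
      if oset.contains p.1 then r
      else r.insert p.1 (p.2.foldl (fun ded f => if ded.any (fun x => pvDictEq f x) then ded else ded ++ [f]) [])) result
  result.items

-- ===== PRECONDITION & SPEC =====
def Spec_group_findings_py (findings : List (List (String × String))) (out : List (String × List (List (String × String)))) : Prop := out = group_findings_py_alt findings
instance (findings : List (List (String × String))) (out : List (String × List (List (String × String)))) : Decidable (Spec_group_findings_py findings out) := by unfold Spec_group_findings_py; infer_instance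

-- ===== CLAIM (what is proved, stated in full; the proofs are below) =====
def Claim_equal_group_findings_py : Prop := ∀ (findings : List (List (String × String))), Dom_group_findings_py findings → Spec_group_findings_py findings (group_findings_py findings)

-- ===== LEMMAS AND PROOFS =====

-- proof-side abbreviations
def pvBkt (l : List (List (String × String))) (t : String) : List (List (String × String)) :=
  l.filter (fun f => pvFT f == t)

def pvTypes (l : List (List (String × String))) : List String :=
  PySem.Set.ofList (l.map pvFT)

def pvDed (xs : List (List (String × String))) : List (List (String × String)) :=
  xs.foldl (fun ded f => if ded.any (fun x => pvDictEq f x) then ded else ded ++ [f]) []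

-- the priority part of the result
def pvOrd (l : List (List (String × String))) : List (String × List (List (String × String))) :=
  (pvOrder.filter (fun t => l.any (fun f => pvFT f == t))).map (fun t => (t, pvBkt l t))

-- the non-priority part of the result
def pvOth (l : List (List (String × String))) : List (String × List (List (String × String))) :=
  ((pvTypes l).filter (fun t => !pvOrder.contains t)).map (fun t => (t, pvDed (pvBkt l t)))


theorem pvDed_def (xs : List (List (String × String))) :
    xs.foldl (fun ded f => if ded.any (fun x => pvDictEq f x) then ded else ded ++ [f]) [] = pvDed xs := rfl

theorem pvDictEq_refl (f : List (String × String)) : pvDictEq f f = true := by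
  simp [pvDictEq]

theorem empty_contains {β : Type} (t : String) :
    (PySem.Dict.empty : PySem.Dict String β).contains t = false := rfl

theorem pvOrder_nodup : pvOrder.Nodup := by decide

theorem mem_pvOrder_ne_other : ∀ t ∈ pvOrder, t ≠ "other" := by decide

theorem contains_mk' {β : Type} (xs : List (String × β)) (t : String) :
    (PySem.Dict.mk xs).contains t = xs.any (fun p => p.1 == t) := rfl

theorem get?_mk' {β : Type} (xs : List (String × β)) (t : String) :
    (PySem.Dict.mk xs).get? t = (xs.find? (fun p => p.1 == t)).map (·.2) := rfl

theorem find?_graph {β : Type} (ts : List String) (v : String → β) (t : String) :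
    (ts.map (fun s => (s, v s))).find? (fun p => p.1 == t)
      = if t ∈ ts then some (t, v t) else none := by
  induction ts with
  | nil => simp
  | cons s ts ih =>
    by_cases h : s = t
    · subst h; simp
    · simp [h, ih, Ne.symm h]

theorem any_key_graph {β : Type} (ts : List String) (v : String → β) (t : String) :
    (ts.map (fun s => (s, v s))).any (fun p => p.1 == t) = decide (t ∈ ts) := by
  induction ts with
  | nil => simp
  | cons s ts ih =>
    by_cases h : s = t
    · subst h; simp
    · simp [h, ih, Ne.symm h]

theorem pvBkt_append_singleton (l : List (List (String × String))) (f : List (String × String)) (t : String) :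
    pvBkt (l ++ [f]) t = pvBkt l t ++ if pvFT f = t then [f] else [] := by
  by_cases h : pvFT f = t <;> simp [pvBkt, List.filter_append, h]

theorem pvBkt_eq_nil (l : List (List (String × String))) (t : String) (h : t ∉ l.map pvFT) :
    pvBkt l t = [] := by
  simp only [pvBkt, List.filter_eq_nil_iff]
  intro f hf
  simp only [beq_iff_eq]
  exact fun he => h (List.mem_map.mpr ⟨f, hf, he⟩)

theorem pvDed_append_singleton (xs : List (List (String × String))) (f : List (String × String)) :
    pvDed (xs ++ [f]) = if (pvDed xs).any (fun x => pvDictEq f x) then pvDed xs else pvDed xs ++ [f] := by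
  simp [pvDed, List.foldl_append]


theorem dict_ext {β : Type} (d e : PySem.Dict String β) (h : d.items = e.items) : d = e := by
  cases d; cases e; cases h; rfl

theorem getD_mk_graph {β : Type} (ts : List String) (v : String → β) (t : String) (dflt : β) :
    (PySem.Dict.mk (ts.map (fun s => (s, v s)))).getD t dflt = if t ∈ ts then v t else dflt := by
  rw [PySem.Dict.getD, get?_mk', find?_graph]
  by_cases h : t ∈ ts <;> simp [h]

theorem pvGroups_eq (l : List (List (String × String))) :
    l.foldl (fun g f => g.modify (pvFT f) [] (· ++ [f])) PySem.Dict.empty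
      = PySem.Dict.mk ((pvTypes l).map (fun t => (t, pvBkt l t))) := by
  induction l using List.reverseRecOn with
  | nil => simp [pvTypes, PySem.Dict.empty]
  | append_singleton l f ih =>
    rw [List.foldl_append, List.foldl_cons, List.foldl_nil, ih]
    apply dict_ext
    have hadd : pvTypes (l ++ [f]) = (PySem.Set.ofList (l.map pvFT)).add (pvFT f) := by
      simp [pvTypes, PySem.Set.ofList_append_singleton]
    by_cases hm : pvFT f ∈ l.map pvFT
    · -- existing bucket: in-place update
      have hmem : pvFT f ∈ pvTypes l := (PySem.Set.mem_ofList _ _).mpr hm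
      have hty : pvTypes (l ++ [f]) = pvTypes l := by
        rw [hadd, PySem.Set.add_of_mem (s := PySem.Set.ofList (l.map pvFT)) ((PySem.Set.mem_ofList _ _).mpr hm)]; rfl
      have hcon : (PySem.Dict.mk ((pvTypes l).map (fun t => (t, pvBkt l t)))).contains (pvFT f) = true := by
        rw [contains_mk', any_key_graph]; simpa using hmem
      rw [PySem.Dict.modify, PySem.Dict.items_insert_of_contains _ _ hcon, hty]
      rw [getD_mk_graph]
      simp only [hmem, if_pos]
      rw [List.map_map]
      apply List.map_congr_left
      intro s _
      by_cases hst : s = pvFT f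
      · subst hst
        simp [pvBkt_append_singleton]
      · have : (s == pvFT f) = false := by simp [hst]
        simp [Function.comp, this, pvBkt_append_singleton, Ne.symm hst]
    · -- new bucket appended at the end
      have hnmem : pvFT f ∉ pvTypes l := fun h => hm ((PySem.Set.mem_ofList _ _).mp h)
      have hty : pvTypes (l ++ [f]) = pvTypes l ++ [pvFT f] := by
        rw [hadd, PySem.Set.add_of_not_mem (s := PySem.Set.ofList (l.map pvFT)) (fun h => hm ((PySem.Set.mem_ofList _ _).mp h))]; rfl
      have hcon : (PySem.Dict.mk ((pvTypes l).map (fun t => (t, pvBkt l t)))).contains (pvFT f) = false := by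
        rw [contains_mk', any_key_graph]; simpa using hnmem
      rw [PySem.Dict.modify, PySem.Dict.items_insert_of_not_contains _ _ hcon, hty]
      rw [getD_mk_graph]
      simp only [hnmem, if_false]
      rw [List.map_append]
      congr 1
      · apply List.map_congr_left
        intro s hs
        have hst : s ≠ pvFT f := fun h => hnmem (h ▸ hs)
        simp [pvBkt_append_singleton, Ne.symm hst]
      · simp [pvBkt_append_singleton, pvBkt_eq_nil l _ hm]

theorem foldl_ins {β : Type} (ts : List String) (c : String → Bool) (v : String → β)
    (g : PySem.Dict String β) (hnd : ts.Nodup) (hfresh : ∀ t ∈ ts, g.contains t = false) :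
    (ts.foldl (fun g t => if c t then g.insert t (v t) else g) g).items
      = g.items ++ (ts.filter c).map (fun t => (t, v t)) := by
  induction ts generalizing g with
  | nil => simp
  | cons t ts ih =>
    have hfr : g.contains t = false := hfresh t (by simp)
    rw [List.foldl_cons]
    cases hc : c t with
    | false =>
      rw [if_neg (by simp)]
      rw [ih g hnd.of_cons (fun s hs => hfresh s (by simp [hs])), List.filter_cons_of_neg (by simp [hc])]
    | true =>
      rw [if_pos rfl]
      have hitems := PySem.Dict.items_insert_of_not_contains g (v t) hfr
      have hfresh' : ∀ s ∈ ts, (g.insert t (v t)).contains s = false := by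
        intro s hs
        have hst : s ≠ t := fun h => (List.nodup_cons.mp hnd).1 (h ▸ hs)
        rw [PySem.Dict.contains_insert]
        simp [hst, hfresh s (by simp [hs])]
      rw [ih (g.insert t (v t)) hnd.of_cons hfresh', hitems,
        List.filter_cons_of_pos (by simp [hc]), List.map_cons, List.append_assoc]
      rfl

theorem foldl_skip {β γ : Type} (ps : List (String × γ)) (q : String → Bool) (w : String × γ → β)
    (r : PySem.Dict String β) (hnd : (ps.map (·.1)).Nodup)
    (hfresh : ∀ p ∈ ps, q p.1 = false → r.contains p.1 = false) :
    (ps.foldl (fun r p => if q p.1 then r else r.insert p.1 (w p)) r).items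
      = r.items ++ (ps.filter (fun p => !q p.1)).map (fun p => (p.1, w p)) := by
  induction ps generalizing r with
  | nil => simp
  | cons p ps ih =>
    rw [List.foldl_cons]
    have hnd' : (ps.map (·.1)).Nodup := (List.nodup_cons.mp (by rw [List.map_cons] at hnd; exact hnd)).2
    cases hq : q p.1 with
    | true =>
      rw [if_pos rfl, ih r hnd' (fun s hs h => hfresh s (by simp [hs]) h), List.filter_cons_of_neg (by simp [hq])]
    | false =>
      rw [if_neg (by simp)]
      have hfr : r.contains p.1 = false := hfresh p (by simp) hq
      have hitems := PySem.Dict.items_insert_of_not_contains r (w p) hfr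
      have hnd2 : (p.1 :: ps.map (fun x => x.1)).Nodup := by rw [List.map_cons] at hnd; exact hnd
      have hfresh' : ∀ s ∈ ps, q s.1 = false → (r.insert p.1 (w p)).contains s.1 = false := by
        intro s hs hqs
        have hst : s.1 ≠ p.1 := by
          intro h
          exact (List.nodup_cons.mp hnd2).1 (h ▸ List.mem_map.mpr ⟨s, hs, rfl⟩)
        rw [PySem.Dict.contains_insert]
        simp [hst, hfresh s (by simp [hs]) hqs]
      rw [ih (r.insert p.1 (w p)) hnd' hfresh', hitems,
        List.filter_cons_of_pos (by simp [hq]), List.map_cons, List.append_assoc]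
      rfl

-- A's second loop, as a named step function (definitionally the port's lambda)
def pvStepA (g : PySem.Dict String (List (List (String × String)))) (f : List (String × String)) :
    PySem.Dict String (List (List (String × String))) :=
  let ftype := pvFT f
  let g := if g.contains ftype then g else g.insert ftype []
  if (g.getD ftype []).any (fun x => pvDictEq f x) then g
  else g.insert ftype (g.getD ftype [] ++ [f])

-- key lists of the two halves of the canonical result
def pvTs1 (l : List (List (String × String))) : List String :=
  pvOrder.filter (fun t => l.any (fun f => pvFT f == t))

def pvTs2 (l : List (List (String × String))) : List String :=
  (pvTypes l).filter (fun t => !pvOrder.contains t)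

theorem pvOrd_graph (l : List (List (String × String))) :
    pvOrd l = (pvTs1 l).map (fun t => (t, pvBkt l t)) := rfl

theorem pvOth_graph (l : List (List (String × String))) :
    pvOth l = (pvTs2 l).map (fun t => (t, pvDed (pvBkt l t))) := rfl

theorem contains_false {ts : List String} {t : String} (h : t ∉ ts) : ts.contains t = false := by
  cases hc : ts.contains t
  · rfl
  · exact absurd (List.contains_iff_mem.mp hc) h

theorem mem_pvTs1 (l : List (List (String × String))) (t : String) :
    t ∈ pvTs1 l ↔ t ∈ pvOrder ∧ ∃ f ∈ l, pvFT f = t := by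
  simp [pvTs1, List.mem_filter, List.any_eq_true]

theorem mem_pvTs2 (l : List (List (String × String))) (t : String) :
    t ∈ pvTs2 l ↔ t ∈ l.map pvFT ∧ t ∉ pvOrder := by
  rw [pvTs2, List.mem_filter, pvTypes, PySem.Set.mem_ofList]
  constructor
  · rintro ⟨h1, h2⟩
    refine ⟨h1, fun hm => ?_⟩
    rw [List.contains_iff_mem.mpr hm] at h2
    simp at h2
  · rintro ⟨h1, h2⟩
    exact ⟨h1, by rw [contains_false h2]; rfl⟩

theorem getD_append_graph {β : Type} (ts1 ts2 : List String) (v1 v2 : String → β) (t : String) (d : β) :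
    (PySem.Dict.mk (ts1.map (fun s => (s, v1 s)) ++ ts2.map (fun s => (s, v2 s)))).getD t d
      = if t ∈ ts1 then v1 t else if t ∈ ts2 then v2 t else d := by
  rw [PySem.Dict.getD, get?_mk', List.find?_append, find?_graph, find?_graph]
  by_cases h1 : t ∈ ts1 <;> by_cases h2 : t ∈ ts2 <;> simp [h1, h2]

theorem contains_append_graph {β : Type} (ts1 ts2 : List String) (v1 v2 : String → β) (t : String) :
    (PySem.Dict.mk (ts1.map (fun s => (s, v1 s)) ++ ts2.map (fun s => (s, v2 s)))).contains t
      = (decide (t ∈ ts1) || decide (t ∈ ts2)) := by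
  rw [contains_mk', List.any_append, any_key_graph, any_key_graph]

theorem replace_graph {β : Type} (ts : List String) (v : String → β) (t : String) (w : β) :
    (ts.map (fun s => (s, v s))).map (fun p => if p.1 == t then (t, w) else p)
      = ts.map (fun s => if s = t then (t, w) else (s, v s)) := by
  rw [List.map_map]
  apply List.map_congr_left
  intro s _
  by_cases h : s = t <;> simp [h]

theorem replace_graph_none {β : Type} (ts : List String) (v : String → β) (t : String) (w : β)
    (h : ∀ s ∈ ts, s ≠ t) :
    (ts.map (fun s => (s, v s))).map (fun p => if p.1 == t then (t, w) else p)
      = ts.map (fun s => (s, v s)) := by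
  rw [replace_graph]
  apply List.map_congr_left
  intro s hs
  simp [h s hs]

-- appending a finding of a priority type leaves the non-priority half unchanged
theorem pvOth_append_order (l : List (List (String × String))) (f : List (String × String))
    (ht : pvFT f ∈ pvOrder) : pvOth (l ++ [f]) = pvOth l := by
  rw [pvOth_graph, pvOth_graph]
  have hts : pvTs2 (l ++ [f]) = pvTs2 l := by
    rw [pvTs2, pvTs2, pvTypes, pvTypes, List.map_append, List.map_singleton, PySem.Set.ofList_append_singleton]
    by_cases hm : pvFT f ∈ PySem.Set.ofList (l.map pvFT)
    · rw [PySem.Set.add_of_mem hm]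
    · rw [PySem.Set.add_of_not_mem hm, List.filter_append]
      simp [ht]
  rw [hts]
  apply List.map_congr_left
  intro s hs
  have hsne : s ≠ pvFT f := by
    intro h
    exact ((mem_pvTs2 l s).mp hs).2 (h ▸ ht)
  rw [pvBkt_append_singleton]
  simp [Ne.symm hsne]

theorem stepA_eq (F l1 : List (List (String × String))) (f : List (String × String)) (hf : f ∈ F) :
    pvStepA (PySem.Dict.mk (pvOrd F ++ pvOth l1)) f
      = PySem.Dict.mk (pvOrd F ++ pvOth (l1 ++ [f])) := by
  rw [pvStepA, pvOrd_graph, pvOth_graph]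
  by_cases ht : pvFT f ∈ pvOrder
  · -- priority type: its full bucket is already present and contains f
    have hts1 : pvFT f ∈ pvTs1 F := (mem_pvTs1 F _).mpr ⟨ht, f, hf, rfl⟩
    rw [contains_append_graph]
    simp only [hts1, decide_true, Bool.true_or, if_true]
    rw [getD_append_graph]
    simp only [hts1, if_pos]
    have hany : (pvBkt F (pvFT f)).any (fun x => pvDictEq f x) = true := by
      rw [List.any_eq_true]
      exact ⟨f, List.mem_filter.mpr ⟨hf, by simp⟩, pvDictEq_refl f⟩
    rw [hany]
    simp only [if_true]
    rw [← pvOth_graph, ← pvOrd_graph, pvOth_append_order l1 f ht]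
  · -- non-priority type
    have hts1 : pvFT f ∉ pvTs1 F := fun h => ht ((mem_pvTs1 F _).mp h).1
    have hts2' : pvTs2 (l1 ++ [f]) = if pvFT f ∈ l1.map pvFT then pvTs2 l1 else pvTs2 l1 ++ [pvFT f] := by
      rw [pvTs2, pvTs2, pvTypes, pvTypes, List.map_append, List.map_singleton, PySem.Set.ofList_append_singleton]
      by_cases hm : pvFT f ∈ l1.map pvFT
      · rw [PySem.Set.add_of_mem (s := PySem.Set.ofList (l1.map pvFT)) ((PySem.Set.mem_ofList _ _).mpr hm)]
        simp [hm]
      · rw [PySem.Set.add_of_not_mem (s := PySem.Set.ofList (l1.map pvFT)) (fun h => hm ((PySem.Set.mem_ofList _ _).mp h)), List.filter_append]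
        simp [hm, ht]
    by_cases hm : pvFT f ∈ l1.map pvFT
    · -- type already has a bucket
      have hts2 : pvFT f ∈ pvTs2 l1 := (mem_pvTs2 l1 _).mpr ⟨hm, ht⟩
      rw [contains_append_graph]
      simp only [hts2, decide_true, Bool.or_true, if_true]
      rw [getD_append_graph]
      simp only [hts1, if_false, hts2, if_pos]
      rw [pvOth_graph, hts2', if_pos hm]
      cases hA : (pvDed (pvBkt l1 (pvFT f))).any (fun x => pvDictEq f x) with
      | true =>
        rw [if_pos rfl]
        congr 1
        congr 1
        apply List.map_congr_left
        intro s hs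
        by_cases hst : s = pvFT f
        · subst hst
          rw [pvBkt_append_singleton, if_pos rfl, pvDed_append_singleton, hA, if_pos rfl]
        · rw [pvBkt_append_singleton]
          simp [Ne.symm hst]
      | false =>
        rw [if_neg (by simp)]
        apply dict_ext
        have hcon : (PySem.Dict.mk ((pvTs1 F).map (fun t => (t, pvBkt F t)) ++ (pvTs2 l1).map (fun t => (t, pvDed (pvBkt l1 t))))).contains (pvFT f) = true := by
          rw [contains_append_graph]; simp [hts2]
        rw [PySem.Dict.items_insert_of_contains _ _ hcon]
        show ((pvTs1 F).map (fun t => (t, pvBkt F t)) ++ (pvTs2 l1).map (fun t => (t, pvDed (pvBkt l1 t)))).map _ = _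
        rw [List.map_append, replace_graph_none _ _ _ _ (fun s hs h => absurd hs (by rw [h]; exact hts1)), replace_graph]
        congr 1
        apply List.map_congr_left
        intro s hs
        by_cases hst : s = pvFT f
        · subst hst
          rw [if_pos rfl, pvBkt_append_singleton, if_pos rfl, pvDed_append_singleton, hA, if_neg (by simp)]
        · rw [if_neg hst, pvBkt_append_singleton]
          simp [Ne.symm hst]
    · -- brand-new type: bucket [] is created, then f appended
      have hts2 : pvFT f ∉ pvTs2 l1 := fun h => hm ((mem_pvTs2 l1 _).mp h).1
      have hcon : (PySem.Dict.mk ((pvTs1 F).map (fun t => (t, pvBkt F t)) ++ (pvTs2 l1).map (fun t => (t, pvDed (pvBkt l1 t))))).contains (pvFT f) = false := by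
        rw [contains_append_graph]; simp [hts1, hts2]
      rw [hcon]
      simp only [Bool.false_eq_true, if_false]
      have hitems := PySem.Dict.items_insert_of_not_contains
        (PySem.Dict.mk ((pvTs1 F).map (fun t => (t, pvBkt F t)) ++ (pvTs2 l1).map (fun t => (t, pvDed (pvBkt l1 t))))) ([] : List (List (String × String))) hcon
      -- view the inserted dict as a two-graph dict over keys pvTs2 l1 ++ [pvFT f]
      have hview : (PySem.Dict.mk ((pvTs1 F).map (fun t => (t, pvBkt F t)) ++ (pvTs2 l1).map (fun t => (t, pvDed (pvBkt l1 t))))).insert (pvFT f) []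
          = PySem.Dict.mk ((pvTs1 F).map (fun t => (t, pvBkt F t))
              ++ (pvTs2 l1 ++ [pvFT f]).map (fun s => (s, if s = pvFT f then [] else pvDed (pvBkt l1 s)))) := by
        apply dict_ext
        rw [hitems]
        show ((pvTs1 F).map (fun t => (t, pvBkt F t)) ++ (pvTs2 l1).map (fun t => (t, pvDed (pvBkt l1 t)))) ++ [(pvFT f, [])] = _
        rw [List.map_append, List.append_assoc]
        congr 1
        congr 1
        · apply List.map_congr_left
          intro s hs
          have : s ≠ pvFT f := fun h => hts2 (h ▸ hs)
          simp [this]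
        · simp
      rw [hview]
      rw [getD_append_graph]
      have hmemnew : pvFT f ∈ pvTs2 l1 ++ [pvFT f] := by simp
      simp only [hts1, if_false, hmemnew, if_pos]
      rw [if_neg (by simp)]
      apply dict_ext
      have hcon2 : (PySem.Dict.mk ((pvTs1 F).map (fun t => (t, pvBkt F t))
          ++ (pvTs2 l1 ++ [pvFT f]).map (fun s => (s, if s = pvFT f then [] else pvDed (pvBkt l1 s))))).contains (pvFT f) = true := by
        rw [contains_append_graph]; simp
      rw [PySem.Dict.items_insert_of_contains _ _ hcon2]
      show ((pvTs1 F).map (fun t => (t, pvBkt F t)) ++ (pvTs2 l1 ++ [pvFT f]).map (fun s => (s, if s = pvFT f then [] else pvDed (pvBkt l1 s)))).map _ = _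
      rw [List.map_append, replace_graph_none _ _ _ _ (fun s hs h => absurd hs (by rw [h]; exact hts1)), replace_graph]
      rw [pvOth_graph, hts2', if_neg hm]
      congr 1
      apply List.map_congr_left
      intro s hs
      by_cases hst : s = pvFT f
      · subst hst
        rw [if_pos rfl, pvBkt_append_singleton, if_pos rfl, pvBkt_eq_nil l1 _ hm]
        simp [pvDed, pvDictEq]
      · rw [if_neg hst, pvBkt_append_singleton]
        simp [hst, Ne.symm hst]

theorem phase2 (F : List (List (String × String))) :
    ∀ (l2 l1 : List (List (String × String))), F = l1 ++ l2 →
    l2.foldl pvStepA (PySem.Dict.mk (pvOrd F ++ pvOth l1))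
      = PySem.Dict.mk (pvOrd F ++ pvOth F) := by
  intro l2
  induction l2 with
  | nil =>
    intro l1 h
    rw [List.append_nil] at h
    subst h
    rfl
  | cons f l2 ih =>
    intro l1 h
    have hf : f ∈ F := by rw [h]; simp
    rw [List.foldl_cons, stepA_eq F l1 f hf]
    exact ih (l1 ++ [f]) (by rw [h, List.append_assoc]; rfl)

theorem filter_isEmpty_eq {α : Type} (l : List α) (p : α → Bool) :
    (l.filter p).isEmpty = !l.any p := by
  induction l with
  | nil => rfl
  | cons a l ih =>
    cases h : p a <;> simp [h, ih]

theorem get_eq_ft (f : List (String × String)) (t : String) (ht : t ≠ "other") :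
    (pvGetFT f == some t) = (pvFT f == t) := by
  cases h : pvGetFT f with
  | none => simp [pvFT, h, Ne.symm ht]
  | some s => simp [pvFT, h]

theorem A_eq_canon (findings : List (List (String × String))) :
    group_findings_py findings = pvOrd findings ++ pvOth findings := by
  simp only [group_findings_py]
  -- phase 1 produces exactly the priority half
  have hstep1 : List.foldl (fun (g : PySem.Dict String (List (List (String × String)))) (ftype : String) =>
        let type_findings := findings.filter (fun f => pvGetFT f == some ftype)
        if type_findings.isEmpty then g else g.insert ftype type_findings) PySem.Dict.empty pvOrder
      = List.foldl (fun g t => if !(findings.filter (fun f => pvGetFT f == some t)).isEmpty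
          then g.insert t (findings.filter (fun f => pvGetFT f == some t)) else g) PySem.Dict.empty pvOrder := by
    apply List.foldl_ext
    intro g t _
    cases h : (findings.filter (fun f => pvGetFT f == some t)).isEmpty <;> simp [h]
  have hitems1 := foldl_ins pvOrder (fun t => !(findings.filter (fun f => pvGetFT f == some t)).isEmpty)
      (fun t => findings.filter (fun f => pvGetFT f == some t)) PySem.Dict.empty pvOrder_nodup
      (fun t _ => empty_contains t)
  have hph1 : List.foldl (fun (g : PySem.Dict String (List (List (String × String)))) (ftype : String) =>
        let type_findings := findings.filter (fun f => pvGetFT f == some ftype)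
        if type_findings.isEmpty then g else g.insert ftype type_findings) PySem.Dict.empty pvOrder
      = PySem.Dict.mk (pvOrd findings ++ pvOth []) := by
    apply dict_ext
    rw [hstep1, hitems1]
    have : pvOth ([] : List (List (String × String))) = [] := rfl
    rw [this, List.append_nil]
    show List.map _ (List.filter _ pvOrder) = pvOrd findings
    rw [pvOrd]
    have hfe : ∀ t ∈ pvOrder, findings.filter (fun f => pvGetFT f == some t) = pvBkt findings t := by
      intro t htm
      apply List.filter_congr
      intro f _
      exact get_eq_ft f t (mem_pvOrder_ne_other t htm)
    have hfl : List.filter (fun t => !(findings.filter (fun f => pvGetFT f == some t)).isEmpty) pvOrder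
        = List.filter (fun t => findings.any (fun f => pvFT f == t)) pvOrder := by
      apply List.filter_congr
      intro t htm
      rw [hfe t htm, pvBkt, filter_isEmpty_eq]
      simp
    rw [hfl]
    apply List.map_congr_left
    intro t htm
    simp only [hfe t ((List.mem_filter.mp htm).1)]
  rw [hph1]
  show (List.foldl pvStepA (PySem.Dict.mk (pvOrd findings ++ pvOth [])) findings).items
      = pvOrd findings ++ pvOth findings
  rw [phase2 findings findings [] rfl]

theorem mem_types_any (l : List (List (String × String))) (t : String) :
    decide (t ∈ pvTypes l) = l.any (fun f => pvFT f == t) := by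
  have hiff : (t ∈ pvTypes l) ↔ (l.any (fun f => pvFT f == t) = true) := by
    rw [pvTypes, PySem.Set.mem_ofList, List.mem_map]
    simp only [List.any_eq_true, beq_iff_eq]
  by_cases h : t ∈ pvTypes l
  · simp [h, hiff.mp h]
  · have hA : l.any (fun f => pvFT f == t) = false := by
      rw [← Bool.not_eq_true]
      exact fun hx => h (hiff.mpr hx)
    simp [h, hA]

theorem B_eq_canon (findings : List (List (String × String))) :
    group_findings_py_alt findings = pvOrd findings ++ pvOth findings := by
  have horder : PySem.Set.ofList pvOrder = pvOrder := PySem.Set.ofList_eq_self_of_nodup _ pvOrder_nodup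
  simp only [group_findings_py_alt]
  rw [pvGroups_eq]
  -- the first result loop, reshaped to an insert-if fold
  have hstep : List.foldl (fun (r : PySem.Dict String (List (List (String × String)))) (t : String) =>
        match (PySem.Dict.mk ((pvTypes findings).map (fun t => (t, pvBkt findings t)))).get? t with
        | some fs => r.insert t fs
        | none => r) PySem.Dict.empty pvOrder
      = List.foldl (fun r t => if decide (t ∈ pvTypes findings) then r.insert t (pvBkt findings t) else r)
          PySem.Dict.empty pvOrder := by
    apply List.foldl_ext
    intro r t _
    rw [get?_mk', find?_graph]
    by_cases h : t ∈ pvTypes findings <;> simp [h]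
  rw [hstep]
  have hitems1 := foldl_ins pvOrder (fun t => decide (t ∈ pvTypes findings)) (fun t => pvBkt findings t)
      PySem.Dict.empty pvOrder_nodup (fun t _ => empty_contains t)
  -- items of the first loop's result are exactly pvOrd findings
  have hord : (pvOrder.filter (fun t => decide (t ∈ pvTypes findings))).map (fun t => (t, pvBkt findings t))
      = pvOrd findings := by
    rw [pvOrd]
    congr 1
    apply List.filter_congr
    intro t _
    exact mem_types_any findings t
  have hitems1' : (List.foldl (fun r t => if decide (t ∈ pvTypes findings) then r.insert t (pvBkt findings t) else r)
      PySem.Dict.empty pvOrder).items = pvOrd findings := by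
    rw [hitems1, hord]; rfl
  -- the second result loop
  simp only [pvDed_def]
  rw [foldl_skip _ (fun s => (PySem.Set.ofList pvOrder).contains s) (fun p => pvDed p.2)]
  · rw [hitems1']
    congr 1
    rw [List.filter_map, List.map_map, pvOth]
    have h1 : List.filter ((fun (p : String × List (List (String × String))) => !(PySem.Set.ofList pvOrder).contains p.1) ∘ (fun t => (t, pvBkt findings t))) (pvTypes findings)
        = List.filter (fun t => !pvOrder.contains t) (pvTypes findings) := by
      apply List.filter_congr
      intro t _
      simp [Function.comp, horder]
    rw [h1]
    rfl
  · rw [List.map_map]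
    have : ((fun (x : String × List (List (String × String))) => x.1) ∘ fun t => (t, pvBkt findings t)) = id := by
      funext t; rfl
    rw [this, List.map_id]
    exact PySem.Set.nodup_ofList _
  · intro p hp hqf
    have hnp : p.1 ∉ pvOrder := by
      intro hmem
      rw [horder, PySem.Set.contains_eq_listContains] at hqf
      rw [List.contains_iff_mem.mpr hmem] at hqf
      simp at hqf
    rw [PySem.Dict.contains, hitems1', pvOrd, any_key_graph]
    simp only [decide_eq_false_iff_not]
    intro hmem
    exact hnp (List.mem_filter.mp hmem).1

-- ===== VERDICT (by name: the statement is the Claim_ definition above) =====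
theorem group_findings_py_spec : Claim_equal_group_findings_py := by
  intro findings _
  unfold Spec_group_findings_py
  rw [A_eq_canon, B_eq_canon]
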